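-- pv_equiv track=rewrite | github.com/youngbryan97/aura | core/kernel/upgrades_10x.py | _choose_best_skill
-- ===== SOURCE A (Python) =====
-- from typing import Dict, List, Optional, TYPE_CHECKING
--
-- def _choose_best_skill(objective: str, matched_skills: List[str]) -> str:
--     if not matched_skills:
--         return ""
--     lower = str(objective or "").lower()
--     if "clock" in matched_skills and any(marker in lower for marker in ("what time", "current time", "the time", "what date", "today", "timer", "remind me")):
--         return "clock"
--     if "web_search" in matched_skills and any(marker in lower for marker in ("search", "look up", "find out", "online", "internet", "current", "latest", "news")):
--         return "web_search"
--     if "sovereign_browser" in matched_skills and any(marker in lower for marker in ("open the browser", "open a browser", "navigate to", "visit ", "open website", "open webpage")):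
--         return "sovereign_browser"
--     if "memory_ops" in matched_skills and any(marker in lower for marker in ("remember", "save this", "store this", "don't forget", "make note of")):
--         return "memory_ops"
--     return matched_skills[0]
-- ===== SOURCE B (Python) =====
-- # Scoring/argmin re-implementation: score each matched skill by the priority of
-- # its keyword rule (4 = no rule fires) and return the argmin over matched_skills.
-- _MARKERS = {
--     "clock": (0, ("what time", "current time", "the time", "what date", "today", "timer", "remind me")),
--     "web_search": (1, ("search", "look up", "find out", "online", "internet", "current", "latest", "news")),
--     "sovereign_browser": (2, ("open the browser", "open a browser", "navigate to", "visit ", "open website", "open webpage")),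
--     "memory_ops": (3, ("remember", "save this", "store this", "don't forget", "make note of")),
-- }
--
-- def _choose_best_skill(objective, matched_skills):
--     if not matched_skills:
--         return ""
--     lower = str(objective or "").lower()
--     def score(skill):
--         entry = _MARKERS.get(skill)
--         if entry is not None and any(m in lower for m in entry[1]):
--             return entry[0]
--         return 4
--     return min(matched_skills, key=score)
-- ===== Notes on version B (the rewrite author's own statement) =====
-- stated objective: alternative
-- what changed: Instead of A's ordered chain of per-rule membership scans over matched_skills, B traverses matched_skills once, scoring each skill by its rule priority (4 if no marker fires), and returns the first minimum-score skill via min(key=...); min's keep-first tie rule makes the all-4 fallback equal matched_skills[0].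
import Mathlib
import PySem

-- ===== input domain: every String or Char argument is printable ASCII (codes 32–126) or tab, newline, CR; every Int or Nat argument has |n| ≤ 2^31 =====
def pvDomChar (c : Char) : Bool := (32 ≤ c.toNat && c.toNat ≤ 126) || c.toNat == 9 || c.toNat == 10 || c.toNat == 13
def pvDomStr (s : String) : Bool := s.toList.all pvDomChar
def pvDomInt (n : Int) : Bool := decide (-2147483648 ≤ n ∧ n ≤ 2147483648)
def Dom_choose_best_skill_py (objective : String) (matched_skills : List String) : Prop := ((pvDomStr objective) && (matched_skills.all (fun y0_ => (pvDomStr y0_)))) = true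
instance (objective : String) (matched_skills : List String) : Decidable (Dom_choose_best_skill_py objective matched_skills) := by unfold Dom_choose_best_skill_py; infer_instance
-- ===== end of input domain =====

-- B replaces A's ordered chain of per-rule membership scans by a single scoring pass over
-- matched_skills plus an argmin (Python min with keep-first ties); same return value.
-- ===== PORT A =====
def choose_best_skill_py (objective : String) (matched_skills : List String) : String :=
  match matched_skills with
  | [] => ""
  | first :: _ =>
    let lower := PySem.Str.lower (if objective == "" then "" else objective)  -- str(objective or "").lower()
    if matched_skills.contains "clock" &&
        (["what time", "current time", "the time", "what date", "today", "timer", "remind me"].any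
          (fun m => PySem.Str.isIn m lower)) then "clock"
    else if matched_skills.contains "web_search" &&
        (["search", "look up", "find out", "online", "internet", "current", "latest", "news"].any
          (fun m => PySem.Str.isIn m lower)) then "web_search"
    else if matched_skills.contains "sovereign_browser" &&
        (["open the browser", "open a browser", "navigate to", "visit ", "open website", "open webpage"].any
          (fun m => PySem.Str.isIn m lower)) then "sovereign_browser"
    else if matched_skills.contains "memory_ops" &&
        (["remember", "save this", "store this", "don't forget", "make note of"].any
          (fun m => PySem.Str.isIn m lower)) then "memory_ops"
    else first  -- matched_skills[0] (list known nonempty here)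

-- ===== PORT B =====
-- the _MARKERS dict of Source B: skill ↦ (priority, marker tuple)
def pvMarkers : PySem.Dict String (Nat × List String) :=
  ⟨[("clock", (0, ["what time", "current time", "the time", "what date", "today", "timer", "remind me"])),
    ("web_search", (1, ["search", "look up", "find out", "online", "internet", "current", "latest", "news"])),
    ("sovereign_browser", (2, ["open the browser", "open a browser", "navigate to", "visit ", "open website", "open webpage"])),
    ("memory_ops", (3, ["remember", "save this", "store this", "don't forget", "make note of"]))]⟩

-- the local 'score' closure of Source B
def pvScore (lower : String) (skill : String) : Nat :=
  match PySem.Dict.get? pvMarkers skill with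
  | some entry => if entry.2.any (fun m => PySem.Str.isIn m lower) then entry.1 else 4
  | none => 4

def choose_best_skill_py_alt (objective : String) (matched_skills : List String) : String :=
  match matched_skills with
  | [] => ""
  | _ :: _ =>
    let lower := PySem.Str.lower (if objective == "" then "" else objective)  -- str(objective or "").lower()
    (PySem.List.min? matched_skills (pvScore lower)).getD ""  -- min(matched_skills, key=score); list nonempty here

-- ===== PRECONDITION & SPEC =====
def Spec_choose_best_skill_py (objective : String) (matched_skills : List String) (out : String) : Prop := out = choose_best_skill_py_alt objective matched_skills
instance (objective : String) (matched_skills : List String) (out : String) : Decidable (Spec_choose_best_skill_py objective matched_skills out) := by unfold Spec_choose_best_skill_py; infer_instance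

-- ===== CLAIM (what is proved, stated in full; the proofs are below) =====
def Claim_equal_choose_best_skill_py : Prop := ∀ (objective : String) (matched_skills : List String), Dom_choose_best_skill_py objective matched_skills → Spec_choose_best_skill_py objective matched_skills (choose_best_skill_py objective matched_skills)

-- ===== LEMMAS AND PROOFS =====

-- the four "some marker fires in lower" booleans
def pvC (lower : String) : Bool :=
  ["what time", "current time", "the time", "what date", "today", "timer", "remind me"].any
    (fun m => PySem.Str.isIn m lower)
def pvW (lower : String) : Bool :=
  ["search", "look up", "find out", "online", "internet", "current", "latest", "news"].any
    (fun m => PySem.Str.isIn m lower)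
def pvS (lower : String) : Bool :=
  ["open the browser", "open a browser", "navigate to", "visit ", "open website", "open webpage"].any
    (fun m => PySem.Str.isIn m lower)
def pvM (lower : String) : Bool :=
  ["remember", "save this", "store this", "don't forget", "make note of"].any
    (fun m => PySem.Str.isIn m lower)

-- closed form of pvScore
lemma pvScore_eq (lower x : String) :
    pvScore lower x =
      if x = "clock" then (if pvC lower then 0 else 4)
      else if x = "web_search" then (if pvW lower then 1 else 4)
      else if x = "sovereign_browser" then (if pvS lower then 2 else 4)
      else if x = "memory_ops" then (if pvM lower then 3 else 4)
      else 4 := by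
  have e : ∀ s : String, x ≠ s → (s == x) = false := by
    intro s h
    exact beq_eq_false_iff_ne.mpr (fun hh => h hh.symm)
  by_cases h1 : x = "clock"
  · subst h1; simp [pvScore, pvMarkers, PySem.Dict.get?, pvC]
  · by_cases h2 : x = "web_search"
    · subst h2; simp [pvScore, pvMarkers, PySem.Dict.get?, List.find?, pvW, e _ h1]
    · by_cases h3 : x = "sovereign_browser"
      · subst h3; simp [pvScore, pvMarkers, PySem.Dict.get?, List.find?, pvS, e _ h1, e _ h2]
      · by_cases h4 : x = "memory_ops"
        · subst h4
          simp [pvScore, pvMarkers, PySem.Dict.get?, List.find?, pvM, e _ h1, e _ h2, e _ h3]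
        · simp [pvScore, pvMarkers, PySem.Dict.get?, List.find?, h1, h2, h3, h4,
            e _ h1, e _ h2, e _ h3, e _ h4]

lemma pvScore_le (lower x : String) : pvScore lower x ≤ 4 := by
  rw [pvScore_eq]; split_ifs <;> omega

-- the value A's chain returns, phrased over element scores
def pvChain (f : String → Nat) (m : List String) (b : String) : String :=
  if m.any (fun y => f y == 0) then "clock"
  else if m.any (fun y => f y == 1) then "web_search"
  else if m.any (fun y => f y == 2) then "sovereign_browser"
  else if m.any (fun y => f y == 3) then "memory_ops"
  else b

-- the body of min's fold, named so it can be reasoned about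
def pvStep (f : String → Nat) (acc : Option String) (x : String) : Option String :=
  match acc with
  | none => some x
  | some m => if f x < f m then some x else some m

lemma min?_eq_foldl_pvStep (f : String → Nat) (xs : List String) :
    PySem.List.min? xs f = xs.foldl (pvStep f) none := by
  rw [PySem.List.min?]
  exact List.foldl_ext _ _ _ (fun a b _ => by cases a <;> rfl)

-- min's fold over the scored list computes pvChain
lemma fold_min_eq_chain (f : String → Nat)
    (h0 : ∀ x, f x = 0 → x = "clock") (h1 : ∀ x, f x = 1 → x = "web_search")
    (h2 : ∀ x, f x = 2 → x = "sovereign_browser") (h3 : ∀ x, f x = 3 → x = "memory_ops")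
    (h4 : ∀ x, f x ≤ 4) :
    ∀ (l : List String) (b : String),
      List.foldl (pvStep f) (some b) l = some (pvChain f (b :: l) b) := by
  intro l
  induction l with
  | nil =>
    intro b
    by_cases e0 : f b = 0
    · simp [pvChain, e0, (h0 b e0).symm]
    · by_cases e1 : f b = 1
      · simp [pvChain, e1, (h1 b e1).symm]
      · by_cases e2 : f b = 2
        · simp [pvChain, e2, (h2 b e2).symm]
        · by_cases e3 : f b = 3
          · simp [pvChain, e3, (h3 b e3).symm]
          · simp [pvChain, e0, e1, e2, e3]
  | cons x l ih =>
    intro b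
    simp only [List.foldl_cons]
    rw [show pvStep f (some b) x = if f x < f b then some x else some b from rfl]
    by_cases hlt : f x < f b
    · rw [if_pos hlt, ih x]
      -- chain over (x :: l) with fallback x = chain over (b :: x :: l) with fallback b
      have hx4 : f x ≤ 3 := by have := h4 b; omega
      interval_cases hfx : f x
      · simp [pvChain, hfx]
      · have b0 : f b ≠ 0 := by omega
        simp [pvChain, List.any_cons, hfx, b0]
      · have b0 : f b ≠ 0 := by omega
        have b1 : f b ≠ 1 := by omega
        simp [pvChain, List.any_cons, hfx, b0, b1]
      · have b0 : f b ≠ 0 := by omega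
        have b1 : f b ≠ 1 := by omega
        have b2 : f b ≠ 2 := by omega
        simp [pvChain, List.any_cons, hfx, b0, b1, b2]
    · rw [if_neg hlt, ih b]
      have hle : f b ≤ f x := by omega
      have hb4 : f b ≤ 4 := h4 b
      interval_cases hfb : f b
      · simp [pvChain, hfb]
      · have x0 : f x ≠ 0 := by omega
        simp [pvChain, List.any_cons, hfb, x0]
      · have x0 : f x ≠ 0 := by omega
        have x1 : f x ≠ 1 := by omega
        simp [pvChain, List.any_cons, hfb, x0, x1]
      · have x0 : f x ≠ 0 := by omega
        have x1 : f x ≠ 1 := by omega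
        have x2 : f x ≠ 2 := by omega
        simp [pvChain, List.any_cons, hfb, x0, x1, x2]
      · have hx4 : f x = 4 := by have := h4 x; omega
        have x0 : f x ≠ 0 := by omega
        have x1 : f x ≠ 1 := by omega
        have x2 : f x ≠ 2 := by omega
        have x3 : f x ≠ 3 := by omega
        simp [pvChain, List.any_cons, hfb, x0, x1, x2, x3]

-- scanning the scores for value i = "skill_i matched and its markers fire"
lemma any_and_const {p : String → Bool} {c : Bool} (m : List String) :
    m.any (fun y => p y && c) = (m.any p && c) := by
  cases c <;> simp

lemma score_pt_zero (lower y : String) :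
    (pvScore lower y == 0) = ((y == "clock") && pvC lower) := by
  rw [pvScore_eq]
  by_cases h : y = "clock"
  · subst h; cases pvC lower <;> simp
  · simp only [if_neg h, beq_eq_false_iff_ne.mpr h, Bool.false_and]
    split_ifs <;> rfl

lemma score_pt_one (lower y : String) :
    (pvScore lower y == 1) = ((y == "web_search") && pvW lower) := by
  rw [pvScore_eq]
  by_cases h : y = "web_search"
  · subst h; cases pvW lower <;> simp
  · simp only [beq_eq_false_iff_ne.mpr h, Bool.false_and]
    split_ifs <;> rfl

lemma score_pt_two (lower y : String) :
    (pvScore lower y == 2) = ((y == "sovereign_browser") && pvS lower) := by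
  rw [pvScore_eq]
  by_cases h : y = "sovereign_browser"
  · subst h; cases pvS lower <;> simp
  · simp only [beq_eq_false_iff_ne.mpr h, Bool.false_and]
    split_ifs <;> rfl

lemma score_pt_three (lower y : String) :
    (pvScore lower y == 3) = ((y == "memory_ops") && pvM lower) := by
  rw [pvScore_eq]
  by_cases h : y = "memory_ops"
  · subst h; cases pvM lower <;> simp
  · simp only [beq_eq_false_iff_ne.mpr h, Bool.false_and]
    split_ifs <;> rfl

lemma any_score_zero (lower : String) (m : List String) :
    m.any (fun y => pvScore lower y == 0) = (m.contains "clock" && pvC lower) := by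
  simp only [score_pt_zero, any_and_const, List.any_beq']

lemma any_score_one (lower : String) (m : List String) :
    m.any (fun y => pvScore lower y == 1) = (m.contains "web_search" && pvW lower) := by
  simp only [score_pt_one, any_and_const, List.any_beq']

lemma any_score_two (lower : String) (m : List String) :
    m.any (fun y => pvScore lower y == 2) = (m.contains "sovereign_browser" && pvS lower) := by
  simp only [score_pt_two, any_and_const, List.any_beq']

lemma any_score_three (lower : String) (m : List String) :
    m.any (fun y => pvScore lower y == 3) = (m.contains "memory_ops" && pvM lower) := by
  simp only [score_pt_three, any_and_const, List.any_beq']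

lemma score_eq_zero (lower : String) : ∀ x, pvScore lower x = 0 → x = "clock" := by
  intro x hx; rw [pvScore_eq] at hx; split_ifs at hx; assumption
lemma score_eq_one (lower : String) : ∀ x, pvScore lower x = 1 → x = "web_search" := by
  intro x hx; rw [pvScore_eq] at hx; split_ifs at hx <;> first | assumption | omega
lemma score_eq_two (lower : String) : ∀ x, pvScore lower x = 2 → x = "sovereign_browser" := by
  intro x hx; rw [pvScore_eq] at hx; split_ifs at hx <;> first | assumption | omega
lemma score_eq_three (lower : String) : ∀ x, pvScore lower x = 3 → x = "memory_ops" := by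
  intro x hx; rw [pvScore_eq] at hx; split_ifs at hx <;> first | assumption | omega

lemma min?_eq_chain (lower : String) (first : String) (rest : List String) :
    PySem.List.min? (first :: rest) (pvScore lower)
      = some (pvChain (pvScore lower) (first :: rest) first) := by
  rw [min?_eq_foldl_pvStep, List.foldl_cons]
  rw [show pvStep (pvScore lower) none first = some first from rfl]
  exact fold_min_eq_chain (pvScore lower) (score_eq_zero lower) (score_eq_one lower)
    (score_eq_two lower) (score_eq_three lower) (pvScore_le lower) rest first

-- ===== VERDICT (by name: the statement is the Claim_ definition above) =====
theorem choose_best_skill_py_spec : Claim_equal_choose_best_skill_py := by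
  intro objective matched_skills _
  unfold Spec_choose_best_skill_py choose_best_skill_py choose_best_skill_py_alt
  cases matched_skills with
  | nil => rfl
  | cons first rest =>
    simp only [min?_eq_chain, Option.getD_some, pvChain, any_score_zero, any_score_one,
      any_score_two, any_score_three, pvC, pvW, pvS, pvM]
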